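-- pv_equiv track=rewrite | github.com/craguerrerosa1030/chazas | Back/app/services/solicitud_service.py | formatear_horarios
-- ===== SOURCE A (Python) =====
-- from typing import List, Optional
--
-- DIAS_SEMANA = ['Lunes', 'Martes', 'Miércoles', 'Jueves', 'Viernes', 'Sábado', 'Domingo']
--
-- def formatear_horarios(horarios: List[str]) -> str:
--     """
--     Convierte lista de horarios ['0-8', '0-9', '1-10'] a texto legible.
--     Agrupa por día para mostrar mejor.
--     """
--     if not horarios:
--         return "Sin horarios especificados"
--
--     # Agrupar por día
--     por_dia = {}
--     for h in horarios:
--         try: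
--             dia, hora = h.split('-')
--             dia = int(dia)
--             hora = int(hora)
--             if dia not in por_dia:
--                 por_dia[dia] = []
--             por_dia[dia].append(hora)
--         except (ValueError, IndexError):
--             continue
--
--     # Formatear
--     resultado = []
--     for dia in sorted(por_dia.keys()):
--         if 0 <= dia < 7:
--             horas = sorted(por_dia[dia])
--             horas_str = ", ".join([f"{h}:00" for h in horas])
--             resultado.append(f"{DIAS_SEMANA[dia]}: {horas_str}")
--
--     return " | ".join(resultado) if resultado else "Sin horarios válidos"
-- ===== SOURCE B (Python) =====
-- from typing import List, Optional, Tuple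
--
-- DIAS_SEMANA = ['Lunes', 'Martes', 'Miércoles', 'Jueves', 'Viernes', 'Sábado', 'Domingo']
--
-- def _parse(h: str) -> Optional[Tuple[int, int]]:
--     partes = h.split('-')
--     if len(partes) != 2:
--         return None
--     try:
--         return int(partes[0]), int(partes[1])
--     except ValueError:
--         return None
--
-- def formatear_horarios(horarios: List[str]) -> str:
--     if not horarios:
--         return "Sin horarios especificados"
--     entradas = [p for p in map(_parse, horarios) if p is not None]
--     grupos = []
--     for dia in range(7):
--         horas = sorted(hora for d, hora in entradas if d == dia)
--         if horas:
--             grupos.append(DIAS_SEMANA[dia] + ": " + ", ".join("%d:00" % h for h in horas))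
--     return " | ".join(grupos) if grupos else "Sin horarios válidos"
-- ===== Notes on version B (the rewrite author's own statement) =====
-- stated objective: simpler
-- what changed: B drops A's dict-grouping entirely: it parses every entry once into (day, hour) pairs via a reusable _parse helper, then sweeps the seven calendar days 0..6 directly, filtering and sorting each day's hours from the flat pair list, instead of building a dict keyed by day and sorting its keys.
import Mathlib
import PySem

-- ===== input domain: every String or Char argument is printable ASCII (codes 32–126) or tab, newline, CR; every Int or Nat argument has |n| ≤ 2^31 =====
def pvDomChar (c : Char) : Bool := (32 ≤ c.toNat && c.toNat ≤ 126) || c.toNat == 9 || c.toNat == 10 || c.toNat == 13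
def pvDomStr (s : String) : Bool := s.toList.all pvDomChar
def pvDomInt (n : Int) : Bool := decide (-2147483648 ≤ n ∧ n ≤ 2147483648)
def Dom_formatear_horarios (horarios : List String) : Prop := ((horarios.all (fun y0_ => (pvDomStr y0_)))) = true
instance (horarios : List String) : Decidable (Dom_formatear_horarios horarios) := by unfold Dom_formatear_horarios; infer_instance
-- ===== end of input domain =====

-- B replaces A's dict-grouping (group into a dict, sort its keys, sort each bucket) by a single
-- parse pass into (day, hour) pairs followed by a direct sweep over the seven calendar days;
-- objective: simpler (no dict, no key sort). Equivalence is proved for every input (A is total).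

-- ===== PORT A =====
def pvDiasSemana : List String :=
  ["Lunes", "Martes", "Miércoles", "Jueves", "Viernes", "Sábado", "Domingo"]

-- A, literally: the try-block is 'dia, hora = h.split('-')' (ValueError unless exactly 2 parts,
-- both matched by the 'some [ds, hs]' arm) then int() twice (ValueError = none); the pair
-- "if dia not in por_dia: por_dia[dia] = []" + "por_dia[dia].append(hora)" is exactly
-- Dict.modify dia [] (· ++ [hora]) (same value, same key position). por_dia[dia] in the second
-- loop is getD (exact: dia is a key there). DIAS_SEMANA[dia] is pyGetD (exact: 0 ≤ dia < 7).
def formatear_horarios (horarios : List String) : String :=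
  if horarios = [] then "Sin horarios especificados"
  else
    let por_dia : PySem.Dict Int (List Int) :=
      horarios.foldl (fun d h =>
        match PySem.Str.split? h "-" with
        | some [ds, hs] =>
          match PySem.Int.ofStr? ds, PySem.Int.ofStr? hs with
          | some dia, some hora => d.modify dia [] (fun v => v ++ [hora])
          | _, _ => d
        | _ => d) PySem.Dict.empty
    let resultado : List String :=
      (PySem.List.sorted por_dia.keys (fun x => x)).foldl (fun acc dia =>
        if decide (0 ≤ dia ∧ dia < 7) = true then
          let horas := PySem.List.sorted (por_dia.getD dia []) (fun x => x)
          let horas_str := PySem.Str.join ", " (horas.map (fun h => PySem.Int.toStr h ++ ":00"))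
          acc ++ [PySem.List.pyGetD pvDiasSemana dia "" ++ ": " ++ horas_str]
        else acc) []
    if resultado ≠ [] then PySem.Str.join " | " resultado else "Sin horarios válidos"

-- ===== PORT B =====
def pvDiasSemanaB : List String :=
  ["Lunes", "Martes", "Miércoles", "Jueves", "Viernes", "Sábado", "Domingo"]

-- _parse from Source B: exactly 2 parts around '-', both int() successes, else None.
-- split? with the literal nonempty separator "-" is never none (getD [] is unreachable);
-- partes[0] / partes[1] are pyGetD (exact: length is 2 there).
def pvParse (h : String) : Option (Int × Int) :=
  let partes := (PySem.Str.split? h "-").getD []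
  if partes.length ≠ 2 then none
  else
    match PySem.Int.ofStr? (PySem.List.pyGetD partes 0 "") with
    | none => none
    | some dia =>
      match PySem.Int.ofStr? (PySem.List.pyGetD partes 1 "") with
      | none => none
      | some hora => some (dia, hora)

def formatear_horarios_alt (horarios : List String) : String :=
  if horarios = [] then "Sin horarios especificados"
  else
    let entradas : List (Int × Int) := horarios.filterMap pvParse
    let grupos : List String :=
      (PySem.List.pyRange 0 7 1).foldl (fun acc dia =>
        let horas := PySem.List.sorted ((entradas.filter (fun p => p.1 == dia)).map (fun p => p.2)) (fun x => x)
        if decide (horas ≠ []) = true then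
          acc ++ [PySem.List.pyGetD pvDiasSemanaB dia "" ++ ": " ++
                  PySem.Str.join ", " (horas.map (fun h => PySem.Int.toStr h ++ ":00"))]
        else acc) []
    if grupos ≠ [] then PySem.Str.join " | " grupos else "Sin horarios válidos"

-- ===== PRECONDITION & SPEC =====
def Spec_formatear_horarios (horarios : List String) (out : String) : Prop := out = formatear_horarios_alt horarios
instance (horarios : List String) (out : String) : Decidable (Spec_formatear_horarios horarios out) := by unfold Spec_formatear_horarios; infer_instance

-- ===== CLAIM (what is proved, stated in full; the proofs are below) =====
def Claim_equal_formatear_horarios : Prop := ∀ (horarios : List String), Dom_formatear_horarios horarios → Spec_formatear_horarios horarios (formatear_horarios horarios)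

-- ===== LEMMAS AND PROOFS =====

-- A's grouping loop is the fold of the modify-step over the successfully parsed entries.
lemma pvFoldA_eq (hs : List String) (d : PySem.Dict Int (List Int)) :
    hs.foldl (fun d h =>
        match PySem.Str.split? h "-" with
        | some [ds, hs] =>
          match PySem.Int.ofStr? ds, PySem.Int.ofStr? hs with
          | some dia, some hora => d.modify dia [] (fun v => v ++ [hora])
          | _, _ => d
        | _ => d) d
    = (hs.filterMap pvParse).foldl (fun d p => d.modify p.1 [] (fun v => v ++ [p.2])) d := by
  induction hs generalizing d with
  | nil => rfl
  | cons h t ih =>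
    have hstep :
        (match PySem.Str.split? h "-" with
          | some [ds, hs] =>
            match PySem.Int.ofStr? ds, PySem.Int.ofStr? hs with
            | some dia, some hora => d.modify dia [] (fun v => v ++ [hora])
            | _, _ => d
          | _ => d)
        = (match pvParse h with
           | some p => d.modify p.1 [] (fun v => v ++ [p.2])
           | none => d) := by
      cases hsp : PySem.Str.split? h "-" with
      | none => simp [pvParse, hsp]
      | some l =>
        match l with
        | [] => simp [pvParse, hsp]
        | [a] => simp [pvParse, hsp]
        | [a, b] =>
          rcases hA : PySem.Int.ofStr? a with _ | da <;> rcases hB : PySem.Int.ofStr? b with _ | hb <;>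
            simp [pvParse, hsp, hA, hB, PySem.List.pyGetD]
        | a :: b :: c :: t' => simp [pvParse, hsp]
    simp only [List.foldl_cons, List.filterMap_cons, hstep]
    cases pvParse h with
    | none => exact ih d
    | some p => simp only [List.foldl_cons]; exact ih _

-- two strictly increasing Int lists with the same members coincide
lemma pvEq_of_pairwise_lt (l1 l2 : List Int)
    (h1 : l1.Pairwise (· < ·)) (h2 : l2.Pairwise (· < ·))
    (hm : ∀ x, x ∈ l1 ↔ x ∈ l2) : l1 = l2 := by
  have nd1 : l1.Nodup := h1.imp (fun h => ne_of_lt h)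
  have nd2 : l2.Nodup := h2.imp (fun h => ne_of_lt h)
  have hp : l1.Perm l2 := (List.perm_ext_iff_of_nodup nd1 nd2).2 hm
  have e1 : PySem.List.sorted l2 (fun x => x) = l1 :=
    PySem.List.sorted_eq_of_perm_of_pairwise_lt l2 l1 (fun x => x) hp h1
  have e2 : PySem.List.sorted l2 (fun x => x) = l2 :=
    PySem.List.sorted_eq_self_of_pairwise l2 (fun x => x) (h2.imp (fun h => le_of_lt h))
  rw [← e1, e2]

-- ===== VERDICT (by name: the statement is the Claim_ definition above) =====
theorem formatear_horarios_spec : Claim_equal_formatear_horarios := by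
  intro horarios _
  unfold Spec_formatear_horarios formatear_horarios formatear_horarios_alt
  by_cases hnil : horarios = []
  · simp [hnil]
  · simp only [if_neg hnil]
    set ps : List (Int × Int) := horarios.filterMap pvParse with hps
    -- the dict built by A
    rw [pvFoldA_eq]
    set d : PySem.Dict Int (List Int) :=
      ps.foldl (fun d p => d.modify p.1 [] (fun v => v ++ [p.2])) PySem.Dict.empty with hd
    have hkeys : d.keys = PySem.Set.ofList (ps.map (fun p => p.1)) := by
      rw [hd]
      have := PySem.Dict.keys_foldl_modify_key ps (fun p => p.1) []
        (fun _ p => fun v => v ++ [p.2]) PySem.Dict.empty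
      simpa [PySem.Set.update_empty] using this
    have hgetD : ∀ dia : Int, d.getD dia [] =
        ((ps.filter (fun p => p.1 == dia)).map (fun p => p.2)) := by
      intro dia
      rw [hd]
      simpa using PySem.Dict.getD_foldl_modify_append ps PySem.Dict.empty dia
    -- turn both accumulation loops into filter+map
    rw [PySem.List.foldl_append_if
        (fun dia => decide (0 ≤ dia ∧ dia < 7))
        (fun dia => PySem.List.pyGetD pvDiasSemana dia "" ++ ": " ++
          PySem.Str.join ", " ((PySem.List.sorted (d.getD dia []) (fun x => x)).map
            (fun h => PySem.Int.toStr h ++ ":00")))]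
    rw [PySem.List.foldl_append_if
        (fun dia => decide (PySem.List.sorted ((ps.filter (fun p => p.1 == dia)).map (fun p => p.2)) (fun x => x) ≠ []))
        (fun dia => PySem.List.pyGetD pvDiasSemanaB dia "" ++ ": " ++
          PySem.Str.join ", " ((PySem.List.sorted ((ps.filter (fun p => p.1 == dia)).map (fun p => p.2)) (fun x => x)).map
            (fun h => PySem.Int.toStr h ++ ":00")))]
    simp only [List.nil_append]
    -- the emitted entry is the same function of dia on both sides
    have hfun : ∀ dia : Int,
        (PySem.List.pyGetD pvDiasSemana dia "" ++ ": " ++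
          PySem.Str.join ", " ((PySem.List.sorted (d.getD dia []) (fun x => x)).map
            (fun h => PySem.Int.toStr h ++ ":00")))
        = (PySem.List.pyGetD pvDiasSemanaB dia "" ++ ": " ++
          PySem.Str.join ", " ((PySem.List.sorted ((ps.filter (fun p => p.1 == dia)).map (fun p => p.2)) (fun x => x)).map
            (fun h => PySem.Int.toStr h ++ ":00"))) := by
      intro dia; rw [hgetD]; rw [show pvDiasSemana = pvDiasSemanaB from rfl]
    -- the two filtered day lists coincide
    have hdays :
        (PySem.List.sorted d.keys (fun x => x)).filter (fun dia => decide (0 ≤ dia ∧ dia < 7))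
        = (PySem.List.pyRange 0 7 1).filter
            (fun dia => decide (PySem.List.sorted ((ps.filter (fun p => p.1 == dia)).map (fun p => p.2)) (fun x => x) ≠ [])) := by
      apply pvEq_of_pairwise_lt
      · have hpw : (PySem.List.sorted d.keys (fun x => x)).Pairwise (· < ·) := by
          rw [hkeys]; exact PySem.List.sorted_ofList_pairwise_lt _
        exact hpw.filter _
      · have hpw : (PySem.List.pyRange 0 7 1).Pairwise (· < ·) := by decide
        exact hpw.filter _
      · intro x
        have hmem : ∀ y : Int, y ∈ PySem.List.sorted d.keys (fun x => x) ↔ y ∈ ps.map (fun p => p.1) := by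
          intro y
          rw [PySem.List.mem_sorted, hkeys, PySem.Set.mem_ofList]
        have hne : ∀ y : Int,
            (PySem.List.sorted ((ps.filter (fun p => p.1 == y)).map (fun p => p.2)) (fun x => x) ≠ [])
            ↔ y ∈ ps.map (fun p => p.1) := by
          intro y
          rw [ne_eq, PySem.List.sorted_eq_nil_iff, List.map_eq_nil_iff, List.filter_eq_nil_iff]
          push Not
          simp [List.mem_map]
        simp only [List.mem_filter, hmem, hne, decide_eq_true_eq,
          PySem.List.mem_pyRange_one]
        constructor
        · rintro ⟨hx, h0, h7⟩; exact ⟨⟨h0, h7⟩, hx⟩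
        · rintro ⟨⟨h0, h7⟩, hx⟩; exact ⟨hx, h0, h7⟩
    rw [List.map_congr_left (fun dia _ => hfun dia), hdays]
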